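-- pv_equiv track=rewrite | github.com/jlpalaciosb/alexico | automata.py | elim_parent
-- ===== SOURCE A (Python) =====
-- def elim_parent(regex):
--     if regex[0] == '(':
--         c = 1
--         i = 1
--         while i < len(regex):
--             if regex[i] == '(':
--                 c += 1
--             elif regex[i] == ')':
--                 c -= 1
--             if c == 0:
--                 break
--             i += 1
--         if i == (len(regex) - 1):
--             return regex[1:-1]
--         else:
--             return regex
--     else:
--         return regex
-- ===== SOURCE B (Python) =====
-- def elim_parent(regex):
--     if regex[0] == '(' and regex[-1] == ')':
--         # keep only the parentheses of the interior, then cancel adjacent "()"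
--         # pairs until a normal form is reached; the outer parens enclose the
--         # whole regex iff that normal form is empty
--         inner = ''.join(ch for ch in regex[1:-1] if ch in '()')
--         while True:
--             reduced = inner.replace('()', '')
--             if reduced == inner:
--                 break
--             inner = reduced
--         if inner == '':
--             return regex[1:-1]
--     return regex
-- ===== Notes on version B (the rewrite author's own statement) =====
-- stated objective: alternative
-- what changed: B replaces A's index-hunting counter loop (find where the running paren count first hits zero, then compare that index with len-1) by a string-rewriting normal form: it filters the interior regex[1:-1] down to its parentheses and repeatedly cancels adjacent open-close pairs with str.replace until a fixpoint; the outer parens are stripped iff the normal form is empty (the Dyck-word characterisation).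
import Mathlib
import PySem

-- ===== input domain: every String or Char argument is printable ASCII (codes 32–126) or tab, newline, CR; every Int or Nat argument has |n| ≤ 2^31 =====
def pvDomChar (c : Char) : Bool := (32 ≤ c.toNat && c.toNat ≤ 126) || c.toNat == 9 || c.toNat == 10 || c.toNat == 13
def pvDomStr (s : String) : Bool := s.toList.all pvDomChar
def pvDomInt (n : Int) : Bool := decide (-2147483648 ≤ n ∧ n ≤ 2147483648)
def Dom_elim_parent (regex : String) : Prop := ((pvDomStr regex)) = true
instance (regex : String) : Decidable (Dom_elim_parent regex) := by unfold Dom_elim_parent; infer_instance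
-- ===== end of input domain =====

-- B replaces A's index-hunting counter loop by a rewriting normal form: filter the interior
-- to its parentheses, cancel adjacent "()" pairs to a fixpoint, strip iff the normal form is
-- empty; objective: alternative. A raises IndexError on "" (and so does B), which Pre_ excludes.

-- ===== PORT A =====
-- the while loop of A: i, c as in the Python; returns the final i
def pvLoopA (s : List Char) (c : Int) (i : Nat) : Nat :=
  if _h : i < s.length then
    let c' := if s[i] = '(' then c + 1 else if s[i] = ')' then c - 1 else c
    if c' = 0 then i else pvLoopA s c' (i + 1)
  else i
termination_by s.length - i

def elim_parent (regex : String) : String :=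
  if PySem.Str.pyGet? regex 0 = some '(' then
    let i := pvLoopA regex.toList 1 1
    if i = regex.toList.length - 1 then PySem.Str.slice regex (some 1) (some (-1))
    else regex
  else regex

-- ===== PORT B =====
-- proof-side model of one replace('()','') pass, used only to justify the loop's termination
def pvRepAll : List Char → List Char
  | [] => []
  | [c] => [c]
  | c :: d :: r => if c = '(' ∧ d = ')' then pvRepAll r else c :: pvRepAll (d :: r)

theorem pvRepAll_len_le : ∀ w : List Char, (pvRepAll w).length ≤ w.length := by
  intro w
  induction w using pvRepAll.induct with
  | case1 => simp [pvRepAll]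
  | case2 c => simp [pvRepAll]
  | case3 c d r h ih =>
    rw [pvRepAll, if_pos h]
    simp only [List.length_cons]
    omega
  | case4 c d r h ih =>
    rw [pvRepAll, if_neg h]
    simp only [List.length_cons] at ih ⊢
    omega

theorem pvRepAll_shrink : ∀ w : List Char, pvRepAll w = w ∨ (pvRepAll w).length < w.length := by
  intro w
  induction w using pvRepAll.induct with
  | case1 => left; rfl
  | case2 c => left; rfl
  | case3 c d r h ih =>
    right
    rw [pvRepAll, if_pos h]
    have := pvRepAll_len_le r
    simp only [List.length_cons]
    omega
  | case4 c d r h ih =>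
    rw [pvRepAll, if_neg h]
    rcases ih with heq | hlt
    · left; rw [heq]
    · right; simp only [List.length_cons] at hlt ⊢; omega

-- PySem.Chars.replace with pattern "()" and empty replacement computes exactly pvRepAll
theorem pv_go_eq : ∀ (fuel : Nat) (l acc : List Char), l.length ≤ fuel →
    PySem.Chars.replace.go ['(', ')'] [] fuel l acc = acc.reverse ++ pvRepAll l := by
  intro fuel
  induction fuel with
  | zero =>
    intro l acc h
    have : l = [] := List.eq_nil_of_length_eq_zero (by omega)
    subst this
    simp [PySem.Chars.replace.go, pvRepAll]
  | succ f ih =>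
    intro l acc h
    cases l with
    | nil => simp [PySem.Chars.replace.go, pvRepAll]
    | cons c t =>
      rw [PySem.Chars.replace.go]
      by_cases hp : List.isPrefixOf ['(', ')'] (c :: t) = true
      · rw [if_pos hp]
        obtain ⟨d, r, hd⟩ : ∃ d r, t = d :: r := by
          cases t with
          | nil => simp [List.isPrefixOf] at hp
          | cons d r => exact ⟨d, r, rfl⟩
        subst hd
        obtain ⟨h1, h2⟩ : '(' = c ∧ ')' = d := by simpa [List.isPrefixOf] using hp
        subst h1; subst h2
        have hdrop : List.drop (['(', ')'] : List Char).length ('(' :: ')' :: r) = r := rfl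
        rw [hdrop]
        simp only [List.reverse_nil, List.nil_append]
        rw [ih r acc (by simp only [List.length_cons] at h; omega)]
        conv_rhs => rw [pvRepAll]
        simp
      · rw [if_neg hp]
        rw [ih t (c :: acc) (by simp only [List.length_cons] at h; omega)]
        cases t with
        | nil => simp [pvRepAll]
        | cons d r =>
          have hne : ¬ (c = '(' ∧ d = ')') := by
            intro ⟨h1, h2⟩; subst h1; subst h2; simp [List.isPrefixOf] at hp
          conv_rhs => rw [pvRepAll]
          rw [if_neg hne]
          simp

theorem pv_replace_eq (l : List Char) :
    PySem.Chars.replace l ['(', ')'] [] = pvRepAll l := by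
  rw [PySem.Chars.replace, if_neg (by simp)]
  simpa using pv_go_eq l.length l [] le_rfl

-- the while loop of B: replace('()','') to a fixpoint
def pvReplLoop (inner : List Char) : List Char :=
  let reduced := PySem.Chars.replace inner ['(', ')'] []
  if reduced = inner then inner else pvReplLoop reduced
termination_by inner.length
decreasing_by
  rename_i hne
  have h : PySem.Chars.replace inner ['(', ')'] [] ≠ inner := hne
  rw [pv_replace_eq] at h
  rcases pvRepAll_shrink inner with h2 | h2
  · exact absurd h2 h
  · show (PySem.Chars.replace inner ['(', ')'] []).length < inner.length
    rw [pv_replace_eq]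
    exact h2

def elim_parent_alt (regex : String) : String :=
  if PySem.Str.pyGet? regex 0 = some '(' ∧ PySem.Str.pyGet? regex (-1) = some ')' then
    -- inner = ''.join(ch for ch in regex[1:-1] if ch in '()'), then the replace loop
    let inner := (PySem.Str.slice regex (some 1) (some (-1))).toList.filter
      (fun ch => ch = '(' || ch = ')')
    if pvReplLoop inner = [] then PySem.Str.slice regex (some 1) (some (-1)) else regex
  else regex

-- ===== PRECONDITION & SPEC =====
-- Pre_ excludes only the empty string, on which Python A raises IndexError (regex[0]).
def Pre_elim_parent (regex : String) : Prop := regex ≠ ""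
instance (regex : String) : Decidable (Pre_elim_parent regex) := by unfold Pre_elim_parent; infer_instance
def pvWitness_elim_parent : String := "(a|b)"
def Spec_elim_parent (regex : String) (out : String) : Prop := out = elim_parent_alt regex
instance (regex : String) (out : String) : Decidable (Spec_elim_parent regex out) := by unfold Spec_elim_parent; infer_instance

-- ===== CLAIM (what is proved, stated in full; the proofs are below) =====
def Claim_equal_elim_parent : Prop := ∀ (regex : String), Dom_elim_parent regex → Pre_elim_parent regex → Spec_elim_parent regex (elim_parent regex)

-- ===== LEMMAS AND PROOFS =====

-- A's loop, restated on the suffix of the list it still has to read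
def pvFindA (l : List Char) (c : Int) : Nat :=
  match l with
  | [] => 0
  | ch :: r =>
    let c' := if ch = '(' then c + 1 else if ch = ')' then c - 1 else c
    if c' = 0 then 0 else 1 + pvFindA r c'

theorem pvLoopA_eq_findA (s : List Char) (c : Int) (i : Nat) :
    pvLoopA s c i = i + pvFindA (s.drop i) c := by
  by_cases h : i < s.length
  · rw [pvLoopA]
    have hd : s.drop i = s[i] :: s.drop (i + 1) := List.drop_eq_getElem_cons h
    rw [hd]
    simp only [h, dif_pos, pvFindA]
    split_ifs <;> first | omega | (rw [pvLoopA_eq_findA]; omega)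
  · rw [pvLoopA]
    have : s.drop i = [] := List.drop_eq_nil_of_le (by omega)
    simp [h, this, pvFindA]
termination_by s.length - i
decreasing_by all_goals omega

-- proof-side balance scan: none = the running balance went negative
def pvScanB (l : List Char) (bal : Int) : Option Int :=
  match l with
  | [] => some bal
  | ch :: r =>
    let b' := if ch = '(' then bal + 1 else if ch = ')' then bal - 1 else bal
    if b' < 0 then none else pvScanB r b'

theorem pvScanB_cons (ch : Char) (r : List Char) (b : Int) :
    pvScanB (ch :: r) b =
      (if (if ch = '(' then b + 1 else if ch = ')' then b - 1 else b) < 0 then none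
       else pvScanB r (if ch = '(' then b + 1 else if ch = ')' then b - 1 else b)) := rfl

-- the key correspondence: A's loop stops exactly at the last position of u ++ [ch]
-- iff ch = ')' and the balance scan of u neither goes negative nor ends nonzero.
theorem pv_main (u : List Char) (ch : Char) (b : Int) (hb : 0 ≤ b) :
    (pvFindA (u ++ [ch]) (b + 1) = u.length ↔ (ch = ')' ∧ pvScanB u b = some 0)) := by
  induction u generalizing b with
  | nil =>
    simp only [List.nil_append, pvFindA, pvScanB, List.length_nil]
    by_cases h1 : ch = '('
    · simp only [h1, Char.reduceEq, reduceIte]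
      split_ifs <;> first | (simp_all; omega) | simp_all | omega
    · by_cases h2 : ch = ')'
      · simp only [h2, Char.reduceEq, reduceIte]
        split_ifs <;> first | (simp_all; omega) | simp_all | omega
      · simp only [if_neg h1, if_neg h2]
        split_ifs <;> first | (simp_all; omega) | simp_all | omega
  | cons d u' ih =>
    simp only [List.cons_append, pvFindA, pvScanB, List.length_cons]
    by_cases hd1 : d = '('
    · simp only [hd1, Char.reduceEq, reduceIte]
      rw [if_neg (by omega : ¬ (b + 1 + 1 : Int) = 0), if_neg (by omega : ¬ (b + 1 : Int) < 0)]
      have hih := ih (b + 1) (by omega)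
      constructor
      · intro h; exact hih.mp (by omega)
      · intro h; have := hih.mpr h; omega
    · by_cases hd2 : d = ')'
      · simp only [hd2, Char.reduceEq, reduceIte]
        by_cases hb0 : b = 0
        · subst hb0
          rw [if_pos (by omega : (0 + 1 - 1 : Int) = 0),
            if_pos (by omega : (0 - 1 : Int) < 0)]
          simp
        · rw [if_neg (by omega : ¬ (b + 1 - 1 : Int) = 0),
            if_neg (by omega : ¬ (b - 1 : Int) < 0)]
          have hih := ih (b - 1) (by omega)
          rw [show (b : Int) - 1 + 1 = b + 1 - 1 by ring] at hih
          constructor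
          · intro h; exact hih.mp (by omega)
          · intro h; have := hih.mpr h; omega
      · simp only [if_neg hd1, if_neg hd2]
        rw [if_neg (by omega : ¬ (b + 1 : Int) = 0), if_neg (by omega : ¬ b < 0)]
        have hih := ih b hb
        constructor
        · intro h; exact hih.mp (by omega)
        · intro h; have := hih.mpr h; omega

-- one replace pass does not change the balance scan
theorem pv_scan_repAll : ∀ (w : List Char) (b : Int), 0 ≤ b →
    pvScanB (pvRepAll w) b = pvScanB w b := by
  intro w
  induction w using pvRepAll.induct with
  | case1 => intro b _; rfl
  | case2 c => intro b _; rfl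
  | case3 c d r h ih =>
    intro b hb
    obtain ⟨h1, h2⟩ := h; subst h1; subst h2
    have e : pvRepAll ('(' :: ')' :: r) = pvRepAll r := by
      rw [pvRepAll]; simp
    rw [e, ih b hb]
    have e2 : pvScanB ('(' :: ')' :: r) b = pvScanB r b := by
      rw [pvScanB_cons, pvScanB_cons]
      simp only [Char.reduceEq, reduceIte, if_true]
      rw [if_neg (by omega), if_neg (by omega)]
      congr 1
      omega
    rw [e2]
  | case4 c d r h ih =>
    intro b hb
    have e : pvRepAll (c :: d :: r) = c :: pvRepAll (d :: r) := by
      rw [pvRepAll, if_neg h]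
    rw [e, pvScanB_cons, pvScanB_cons]
    set b' := if c = '(' then b + 1 else if c = ')' then b - 1 else b with hb'
    by_cases hneg : b' < 0
    · rw [if_pos hneg, if_pos hneg]
    · rw [if_neg hneg, if_neg hneg]
      have hb'0 : 0 ≤ b' := by omega
      exact ih b' hb'0

-- dropping non-parenthesis characters does not change the balance scan
theorem pv_scan_filter : ∀ (u : List Char) (b : Int), 0 ≤ b →
    pvScanB (u.filter fun ch => ch = '(' || ch = ')') b = pvScanB u b := by
  intro u
  induction u with
  | nil => intro b _; rfl
  | cons c r ih =>
    intro b hb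
    by_cases hc : c = '(' ∨ c = ')'
    · have hkeep : (decide (c = '(') || decide (c = ')')) = true := by
        rcases hc with h | h <;> simp [h]
      simp only [List.filter_cons, hkeep, if_pos]
      rw [pvScanB_cons, pvScanB_cons]
      set b' := if c = '(' then b + 1 else if c = ')' then b - 1 else b with hb'
      have hge : b' = b + 1 ∨ b' = b - 1 := by
        rcases hc with h | h <;> simp [hb', h]
      by_cases hneg : b' < 0
      · rw [if_pos hneg, if_pos hneg]
      · rw [if_neg hneg, if_neg hneg]
        exact ih b' (by omega)
    · push_neg at hc
      have hdrop : (decide (c = '(') || decide (c = ')')) = false := by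
        simp [hc.1, hc.2]
      simp only [List.filter_cons, hdrop, Bool.false_eq_true, if_neg, not_false_iff]
      rw [ih b hb, pvScanB_cons]
      have e : (if c = '(' then b + 1 else if c = ')' then b - 1 else b) = b := by
        simp [hc.1, hc.2]
      rw [e, if_neg (by omega)]

-- the replace loop preserves the balance scan, reaches a fixpoint, and keeps 'parens only'
theorem pv_loop_scan : ∀ (w : List Char) (b : Int), 0 ≤ b →
    pvScanB (pvReplLoop w) b = pvScanB w b := by
  intro w
  induction w using pvReplLoop.induct with
  | case1 inner red heq =>
    intro b _
    rw [pvReplLoop]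
    simp only [red, heq, if_pos]
  | case2 inner red hne ih =>
    intro b hb
    rw [pvReplLoop]
    simp only [red] at hne ih ⊢
    rw [if_neg hne, ih b hb, pv_replace_eq, pv_scan_repAll inner b hb]

theorem pv_loop_fix : ∀ w : List Char, pvRepAll (pvReplLoop w) = pvReplLoop w := by
  intro w
  induction w using pvReplLoop.induct with
  | case1 inner red heq =>
    rw [pvReplLoop]
    simp only [red, heq, if_pos]
    rw [← pv_replace_eq]; exact heq
  | case2 inner red hne ih =>
    rw [pvReplLoop]
    simp only [red] at hne ih ⊢
    rw [if_neg hne]; exact ih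

theorem pvRepAll_sublist : ∀ w : List Char, (pvRepAll w).Sublist w := by
  intro w
  induction w using pvRepAll.induct with
  | case1 => simp [pvRepAll]
  | case2 c => simp [pvRepAll]
  | case3 c d r h ih =>
    rw [pvRepAll, if_pos h]
    exact ih.trans ((List.sublist_cons_self d r).trans (List.sublist_cons_self c (d :: r)))
  | case4 c d r h ih =>
    rw [pvRepAll, if_neg h]
    exact ih.cons₂ c

theorem pv_loop_sublist : ∀ w : List Char, (pvReplLoop w).Sublist w := by
  intro w
  induction w using pvReplLoop.induct with
  | case1 inner red heq =>
    rw [pvReplLoop]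
    simp only [red, heq, if_pos]
    exact List.Sublist.refl inner
  | case2 inner red hne ih =>
    rw [pvReplLoop]
    simp only [red] at hne ih ⊢
    rw [if_neg hne]
    refine ih.trans ?_
    rw [pv_replace_eq]
    exact pvRepAll_sublist inner

-- a parens-only fixpoint of the replace pass has all ')' before all '('
theorem pv_fix_shape : ∀ w : List Char, (∀ c ∈ w, c = '(' ∨ c = ')') → pvRepAll w = w →
    ∃ k m, w = List.replicate k ')' ++ List.replicate m '(' := by
  intro w
  induction w using pvRepAll.induct with
  | case1 => intro _ _; exact ⟨0, 0, rfl⟩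
  | case2 c =>
    intro hp _
    rcases hp c (by simp) with h | h
    · exact ⟨0, 1, by simp [h]⟩
    · exact ⟨1, 0, by simp [h]⟩
  | case3 c d r h ih =>
    intro _ hfix
    exfalso
    rw [pvRepAll, if_pos h] at hfix
    have h1 := pvRepAll_len_le r
    have h2 : (pvRepAll r).length = (c :: d :: r).length := by rw [hfix]
    simp only [List.length_cons] at h2
    omega
  | case4 c d r h ih =>
    intro hp hfix
    rw [pvRepAll, if_neg h] at hfix
    have hfix2 : pvRepAll (d :: r) = d :: r := by
      have := congrArg List.tail hfix
      simpa using this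
    obtain ⟨k, m, hkm⟩ := ih (fun x hx => hp x (by simp [hx])) hfix2
    rcases hp c (by simp) with hc | hc
    · -- c = '(' : the tail must hold no ')', i.e. k = 0
      cases k with
      | zero =>
        refine ⟨0, m + 1, ?_⟩
        have htail : d :: r = List.replicate m '(' := by simpa using hkm
        simp [List.replicate_succ, htail, hc]
      | succ k' =>
        exfalso
        rw [List.replicate_succ, List.cons_append] at hkm
        have hd : d = ')' := by
          have := congrArg List.head? hkm
          simpa using this
        exact h ⟨hc, hd⟩
    · refine ⟨k + 1, m, ?_⟩
      rw [List.replicate_succ, List.cons_append, ← hkm, hc]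

theorem pv_scan_replicate_open : ∀ (m : Nat) (b : Int), 0 ≤ b →
    pvScanB (List.replicate m '(') b = some (b + m) := by
  intro m
  induction m with
  | zero => intro b _; simp [pvScanB]
  | succ m ih =>
    intro b hb
    rw [List.replicate_succ]
    simp only [pvScanB, Char.reduceEq, reduceIte]
    rw [if_neg (by omega : ¬ (b + 1 : Int) < 0), ih (b + 1) (by omega)]
    congr 1
    push_cast
    ring

-- the central equivalence: B's normal form is empty iff A's balance scan is clean
theorem pvRed_iff (u : List Char) :
    pvReplLoop (u.filter fun ch => ch = '(' || ch = ')') = [] ↔ pvScanB u 0 = some 0 := by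
  set f := u.filter fun ch => ch = '(' || ch = ')' with hf
  constructor
  · intro h
    have := pv_loop_scan f 0 le_rfl
    rw [h] at this
    simp only [pvScanB] at this
    rw [← pv_scan_filter u 0 le_rfl, ← hf, ← this]
  · intro h
    have hscan : pvScanB (pvReplLoop f) 0 = some 0 := by
      rw [pv_loop_scan f 0 le_rfl, hf, pv_scan_filter u 0 le_rfl, h]
    have hparens : ∀ c ∈ pvReplLoop f, c = '(' ∨ c = ')' := by
      intro c hc
      have hmem := (pv_loop_sublist f).mem hc
      rw [hf] at hmem
      have := List.of_mem_filter hmem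
      simp at this
      tauto
    obtain ⟨k, m, hkm⟩ := pv_fix_shape (pvReplLoop f) hparens (pv_loop_fix f)
    cases k with
    | zero =>
      simp only [List.replicate, List.nil_append] at hkm
      rw [hkm] at hscan
      rw [pv_scan_replicate_open m 0 le_rfl] at hscan
      have : (m : Int) = 0 := by simpa using hscan
      have hm : m = 0 := by exact_mod_cast this
      rw [hkm, hm]
      simp
    | succ k' =>
      exfalso
      rw [hkm, List.replicate_succ, List.cons_append] at hscan
      simp only [pvScanB, Char.reduceEq, reduceIte] at hscan
      rw [if_pos (by omega : (0 - 1 : Int) < 0)] at hscan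
      simp at hscan

theorem pv_slice_toList (regex : String) :
    (PySem.Str.slice regex (some 1) (some (-1))).toList = (regex.toList.drop 1).dropLast := by
  simp [PySem.Str.slice, PySem.Chars.slice, PySem.List.slice, PySem.List.clampIdx,
    List.dropLast_eq_take]
  by_cases h : regex = ""
  · subst h; simp
  · have hlen : 1 ≤ regex.length := by
      rcases Nat.eq_zero_or_pos regex.length with hn | hn
      · exact absurd ((String.length_eq_zero_iff.mp hn)) h
      · omega
    rw [if_neg h, show min 1 regex.length = 1 by omega,
      show ((regex.length : Int) + -1).toNat = regex.length - 1 by omega,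
      List.drop_one]

theorem elim_parent_spec : Claim_equal_elim_parent := by
  intro regex _ _
  unfold Spec_elim_parent elim_parent elim_parent_alt
  have hget0 : PySem.Str.pyGet? regex 0 = regex.toList[(0:Nat)]? := by
    simpa using PySem.Str.pyGet?_natCast regex 0
  by_cases h0 : PySem.Str.pyGet? regex 0 = some '('
  · -- s = '(' :: t
    obtain ⟨t, hs⟩ : ∃ t, regex.toList = '(' :: t := by
      rw [hget0] at h0
      cases hsl : regex.toList with
      | nil => rw [hsl] at h0; simp at h0
      | cons a t => rw [hsl] at h0; simp at h0; exact ⟨t, by rw [h0]⟩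
    rw [if_pos h0]
    have hloop : pvLoopA regex.toList 1 1 = 1 + pvFindA t 1 := by
      rw [pvLoopA_eq_findA, hs]; simp
    cases ht : t.getLast? with
    | none =>
      -- t = [], regex = "("
      have ht0 : t = [] := List.getLast?_eq_none_iff.mp ht
      have hlast : PySem.Str.pyGet? regex (-1) = some '(' := by
        simp [PySem.Str.pyGet?, PySem.Chars.pyGet?, hs, ht0, PySem.List.pyGet?_neg_one]
      have hAcond : ¬ pvLoopA regex.toList 1 1 = regex.toList.length - 1 := by
        rw [hloop, hs, ht0]; simp [pvFindA]
      have hBcond : ¬ (PySem.Str.pyGet? regex 0 = some '(' ∧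
          PySem.Str.pyGet? regex (-1) = some ')') := by
        rw [hlast]; rintro ⟨-, h⟩; simp at h
      rw [if_neg hBcond, if_neg hAcond]
    | some ch =>
      obtain ⟨u, hu⟩ : ∃ u, t = u ++ [ch] := by
        rcases List.getLast?_eq_some_iff.mp ht with ⟨u, hu⟩
        exact ⟨u, hu⟩
      have hgl : regex.toList.getLast? = some ch := by
        rw [hs, hu, ← List.cons_append]; exact List.getLast?_concat
      have hlast : PySem.Str.pyGet? regex (-1) = some ch := by
        simp [PySem.Str.pyGet?, PySem.Chars.pyGet?, PySem.List.pyGet?_neg_one, hgl]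
      have hinner : (PySem.Str.slice regex (some 1) (some (-1))).toList = u := by
        rw [pv_slice_toList, hs, hu]; simp
      have hcond : (pvLoopA regex.toList 1 1 = regex.toList.length - 1)
          ↔ (ch = ')' ∧ pvScanB u 0 = some 0) := by
        rw [hloop, hs, hu]
        have := pv_main u ch 0 le_rfl
        simp only [zero_add] at this
        rw [← this]
        simp [List.length_append]
        omega
      by_cases hA : pvLoopA regex.toList 1 1 = regex.toList.length - 1
      · obtain ⟨hch, hscan⟩ := hcond.mp hA
        have hBcond : PySem.Str.pyGet? regex 0 = some '(' ∧
            PySem.Str.pyGet? regex (-1) = some ')' := ⟨h0, by rw [hlast, hch]⟩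
        rw [if_pos hA, if_pos hBcond]
        simp only [hinner]
        rw [if_pos ((pvRed_iff u).mpr hscan)]
      · rw [if_neg hA]
        by_cases hB : PySem.Str.pyGet? regex 0 = some '(' ∧ PySem.Str.pyGet? regex (-1) = some ')'
        · have hch : ch = ')' := by
            have := hB.2; rw [hlast] at this; exact (Option.some_inj.mp this)
          rw [if_pos hB]
          simp only [hinner]
          rw [if_neg (fun hred => hA (hcond.mpr ⟨hch, (pvRed_iff u).mp hred⟩))]
        · rw [if_neg hB]
  · rw [if_neg h0, if_neg (by rintro ⟨h, -⟩; exact h0 h)]
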